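-- pv_equiv track=rewrite | github.com/yuhangRT/FlashGlyph | student_model/inspect_modules_simple.py | categorize_modules
-- ===== SOURCE A (Python) =====
-- def categorize_modules(target_modules):
--     """将模块分类以便更好地展示"""
--     categories = {
--         'ControlNet Zero Convs (Conv2D)': [],
--         'ControlNet Attention (Linear)': [],
--         'UNet Input Blocks Attention (Linear)': [],
--         'UNet Middle Block Attention (Linear)': [],
--         'UNet Output Blocks Attention (Linear)': [],
--     }
--
--     for module in target_modules:
--         if 'zero_convs' in module:
--             categories['ControlNet Zero Convs (Conv2D)'].append(module)
--         elif 'control_model.input_blocks' in module or 'control_model.middle_block' in module: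
--             categories['ControlNet Attention (Linear)'].append(module)
--         elif 'model.diffusion_model.input_blocks' in module:
--             categories['UNet Input Blocks Attention (Linear)'].append(module)
--         elif 'model.diffusion_model.middle_block' in module:
--             categories['UNet Middle Block Attention (Linear)'].append(module)
--         elif 'model.diffusion_model.output_blocks' in module:
--             categories['UNet Output Blocks Attention (Linear)'].append(module)
--
--     return categories
-- ===== SOURCE B (Python) =====
-- RULES = [
--     ('ControlNet Zero Convs (Conv2D)', ('zero_convs',)),
--     ('ControlNet Attention (Linear)',
--      ('control_model.input_blocks', 'control_model.middle_block')),
--     ('UNet Input Blocks Attention (Linear)', ('model.diffusion_model.input_blocks',)),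
--     ('UNet Middle Block Attention (Linear)', ('model.diffusion_model.middle_block',)),
--     ('UNet Output Blocks Attention (Linear)', ('model.diffusion_model.output_blocks',)),
-- ]
--
--
-- def categorize_modules(target_modules):
--     """将模块分类以便更好地展示"""
--     result = {}
--     earlier = []
--     for name, subs in RULES:
--         result[name] = [m for m in target_modules
--                         if any(s in m for s in subs)
--                         and not any(s in m for e in earlier for s in e)]
--         earlier.append(subs)
--     return result
-- ===== Notes on version B (the rewrite author's own statement) =====
-- stated objective: alternative
-- what changed: Replaces the single pass with an if/elif chain appending into pre-made buckets by a per-category decomposition: a rule table is folded over, and each bucket is computed as one filter of the whole input (matches this rule's substrings and no earlier rule's), so there is no branch chain and no mutable bucket state per module.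
import Mathlib
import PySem

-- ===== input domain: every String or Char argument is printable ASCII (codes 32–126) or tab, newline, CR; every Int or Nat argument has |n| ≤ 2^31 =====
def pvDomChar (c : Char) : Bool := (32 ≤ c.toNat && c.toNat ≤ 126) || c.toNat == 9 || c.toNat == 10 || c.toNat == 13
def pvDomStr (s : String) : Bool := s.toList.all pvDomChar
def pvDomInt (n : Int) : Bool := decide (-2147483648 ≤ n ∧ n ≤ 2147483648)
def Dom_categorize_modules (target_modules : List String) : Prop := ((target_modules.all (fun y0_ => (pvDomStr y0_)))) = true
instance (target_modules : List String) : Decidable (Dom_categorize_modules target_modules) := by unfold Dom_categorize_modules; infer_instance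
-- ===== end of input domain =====

-- B replaces A's per-module if/elif dispatch by a per-category decomposition (one filter per rule
-- over the whole list, excluding earlier rules' matches); same cost, different structure.

-- ===== PORT A =====
-- The Python dict has five fixed literal keys; it is represented by its five buckets
-- (a 5-tuple of lists) and assembled into the insertion-order association list at the end.
def pvStepA (st : List String × List String × List String × List String × List String)
    (m : String) : List String × List String × List String × List String × List String :=
  if PySem.Str.isIn "zero_convs" m then
    (st.1 ++ [m], st.2.1, st.2.2.1, st.2.2.2.1, st.2.2.2.2)
  else if PySem.Str.isIn "control_model.input_blocks" m || PySem.Str.isIn "control_model.middle_block" m then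
    (st.1, st.2.1 ++ [m], st.2.2.1, st.2.2.2.1, st.2.2.2.2)
  else if PySem.Str.isIn "model.diffusion_model.input_blocks" m then
    (st.1, st.2.1, st.2.2.1 ++ [m], st.2.2.2.1, st.2.2.2.2)
  else if PySem.Str.isIn "model.diffusion_model.middle_block" m then
    (st.1, st.2.1, st.2.2.1, st.2.2.2.1 ++ [m], st.2.2.2.2)
  else if PySem.Str.isIn "model.diffusion_model.output_blocks" m then
    (st.1, st.2.1, st.2.2.1, st.2.2.2.1, st.2.2.2.2 ++ [m])
  else st

def categorize_modules (target_modules : List String) : List (String × List String) :=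
  let cats := target_modules.foldl pvStepA ([], [], [], [], [])
  [("ControlNet Zero Convs (Conv2D)", cats.1),
   ("ControlNet Attention (Linear)", cats.2.1),
   ("UNet Input Blocks Attention (Linear)", cats.2.2.1),
   ("UNet Middle Block Attention (Linear)", cats.2.2.2.1),
   ("UNet Output Blocks Attention (Linear)", cats.2.2.2.2)]

-- ===== PORT B =====
def pvRules : List (String × List String) :=
  [("ControlNet Zero Convs (Conv2D)", ["zero_convs"]),
   ("ControlNet Attention (Linear)", ["control_model.input_blocks", "control_model.middle_block"]),
   ("UNet Input Blocks Attention (Linear)", ["model.diffusion_model.input_blocks"]),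
   ("UNet Middle Block Attention (Linear)", ["model.diffusion_model.middle_block"]),
   ("UNet Output Blocks Attention (Linear)", ["model.diffusion_model.output_blocks"])]

-- dict with fresh keys inserted in rule order = association list appended in rule order
def categorize_modules_alt (target_modules : List String) : List (String × List String) :=
  (pvRules.foldl
    (fun (st : List (String × List String) × List (List String)) r =>
      (st.1 ++ [(r.1, target_modules.filter (fun m =>
          (r.2.any (fun s => PySem.Str.isIn s m)) &&
          !(st.2.any (fun e => e.any (fun s => PySem.Str.isIn s m)))))],
       st.2 ++ [r.2]))
    ([], [])).1

-- ===== PRECONDITION & SPEC =====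
def Spec_categorize_modules (target_modules : List String) (out : List (String × List String)) : Prop := out = categorize_modules_alt target_modules
instance (target_modules : List String) (out : List (String × List String)) : Decidable (Spec_categorize_modules target_modules out) := by unfold Spec_categorize_modules; infer_instance

-- ===== CLAIM (what is proved, stated in full; the proofs are below) =====
def Claim_equal_categorize_modules : Prop := ∀ (target_modules : List String), Dom_categorize_modules target_modules → Spec_categorize_modules target_modules (categorize_modules target_modules)

-- ===== LEMMAS AND PROOFS =====

-- the first-match predicates, as B's filters compute them
def pvP1 (m : String) : Bool := PySem.Str.isIn "zero_convs" m
def pvP2 (m : String) : Bool :=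
  (PySem.Str.isIn "control_model.input_blocks" m || PySem.Str.isIn "control_model.middle_block" m) && !pvP1 m
def pvP3 (m : String) : Bool :=
  PySem.Str.isIn "model.diffusion_model.input_blocks" m && !pvP1 m &&
  !(PySem.Str.isIn "control_model.input_blocks" m || PySem.Str.isIn "control_model.middle_block" m)
def pvP4 (m : String) : Bool :=
  PySem.Str.isIn "model.diffusion_model.middle_block" m && !pvP1 m &&
  !(PySem.Str.isIn "control_model.input_blocks" m || PySem.Str.isIn "control_model.middle_block" m) &&
  !PySem.Str.isIn "model.diffusion_model.input_blocks" m
def pvP5 (m : String) : Bool :=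
  PySem.Str.isIn "model.diffusion_model.output_blocks" m && !pvP1 m &&
  !(PySem.Str.isIn "control_model.input_blocks" m || PySem.Str.isIn "control_model.middle_block" m) &&
  !PySem.Str.isIn "model.diffusion_model.input_blocks" m &&
  !PySem.Str.isIn "model.diffusion_model.middle_block" m

lemma foldA_eq (tm : List String) :
    ∀ c1 c2 c3 c4 c5,
      tm.foldl pvStepA (c1, c2, c3, c4, c5) =
        (c1 ++ tm.filter pvP1, c2 ++ tm.filter pvP2, c3 ++ tm.filter pvP3,
         c4 ++ tm.filter pvP4, c5 ++ tm.filter pvP5) := by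
  induction tm with
  | nil => simp
  | cons m tm ih =>
    intro c1 c2 c3 c4 c5
    simp only [List.foldl_cons, List.filter_cons, pvStepA, pvP1, pvP2, pvP3, pvP4, pvP5]
    split_ifs with h1 h2 h3 h4 h5 <;>
      simp_all [List.append_assoc]

-- ===== VERDICT (by name: the statement is the Claim_ definition above) =====
theorem categorize_modules_spec : Claim_equal_categorize_modules := by
  intro tm _
  show _ = _
  simp only [categorize_modules, categorize_modules_alt, pvRules, List.foldl_cons,
    List.foldl_nil, List.any_cons, List.any_nil, foldA_eq, List.nil_append]
  refine congrArg₂ _ (congrArg _ ?_) (congrArg₂ _ (congrArg _ ?_) (congrArg₂ _ (congrArg _ ?_)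
    (congrArg₂ _ (congrArg _ ?_) (congrArg₂ _ (congrArg _ ?_) rfl)))) <;>
    exact List.filter_congr (fun m _ => by
      simp [pvP1, pvP2, pvP3, pvP4, pvP5, Bool.and_assoc])
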